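-- pv_equiv track=rewrite | github.com/elgonio/CE | data_processing.py | split_unique_players
-- ===== SOURCE A (Python) =====
-- intermediate_threshold = 12
--
-- advanced_threshold = 21
--
-- master_threshold = 26
--
-- def split_unique_players(unique_players):
--     # split the unique players into 3 categories according to their highest rank
--     # 1. Beginners: rank 1 - 11
--     # 2. Intermediate: rank 12 - 20
--     # 3. Advanced: rank 21+
--     # 4. Master: rank 26+
--
--     beginners = {}
--     intermediate = {}
--     advanced = {}
--     master = {}
--     for user_id, data in unique_players.items():
--         if data['rank'] <= intermediate_threshold:
--             beginners[user_id] = data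
--         elif data['rank'] <= advanced_threshold:
--             intermediate[user_id] = data
--         elif data['rank'] <= master_threshold:
--             advanced[user_id] = data
--         else:
--             master[user_id] = data
--
--     return beginners, intermediate, advanced, master
-- ===== SOURCE B (Python) =====
-- intermediate_threshold = 12
--
-- advanced_threshold = 21
--
-- master_threshold = 26
--
-- def split_unique_players(unique_players):
--     # Four staged dict-comprehension passes, one per category, instead of a
--     # single loop with an if/elif cascade over four accumulators.
--     items = unique_players.items()
--     beginners    = {u: d for u, d in items if d['rank'] <= intermediate_threshold}
--     intermediate = {u: d for u, d in items if intermediate_threshold < d['rank'] <= advanced_threshold}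
--     advanced     = {u: d for u, d in items if advanced_threshold < d['rank'] <= master_threshold}
--     master       = {u: d for u, d in items if master_threshold < d['rank']}
--     return beginners, intermediate, advanced, master
-- ===== Notes on version B (the rewrite author's own statement) =====
-- stated objective: idiomatic
-- what changed: Replaces the single accumulator loop with an if/elif cascade over four dicts by four staged dict-comprehension passes, one independent filter per category with an explicit interval predicate.
import Mathlib
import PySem

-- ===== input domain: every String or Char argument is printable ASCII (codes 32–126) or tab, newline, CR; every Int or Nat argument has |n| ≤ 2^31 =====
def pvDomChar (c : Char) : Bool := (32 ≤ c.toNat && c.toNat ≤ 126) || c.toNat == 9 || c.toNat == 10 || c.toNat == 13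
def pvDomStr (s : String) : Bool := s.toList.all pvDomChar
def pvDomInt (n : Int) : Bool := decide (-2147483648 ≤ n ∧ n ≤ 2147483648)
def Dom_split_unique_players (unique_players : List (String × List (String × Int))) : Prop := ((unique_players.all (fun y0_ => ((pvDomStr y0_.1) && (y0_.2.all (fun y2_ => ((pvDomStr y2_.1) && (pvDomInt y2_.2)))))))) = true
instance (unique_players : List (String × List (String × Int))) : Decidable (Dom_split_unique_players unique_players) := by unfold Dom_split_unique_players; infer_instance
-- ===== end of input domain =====

-- B replaces the single accumulator loop with an if/elif cascade by four staged
-- dict-comprehension passes, one independent interval filter per category (idiomatic; same O(n) order).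

-- ===== PORT A =====
def intermediate_threshold : Int := 12
def advanced_threshold : Int := 21
def master_threshold : Int := 26

-- data['rank'] is ported as getD … 0; inputs where the key is absent (Python KeyError)
-- are excluded by Pre_ below.
def split_unique_players (unique_players : List (String × List (String × Int))) : (List (String × List (String × Int))) × (List (String × List (String × Int))) × (List (String × List (String × Int))) × (List (String × List (String × Int))) :=
  let r := unique_players.foldl (fun st p =>
      let beginners := st.1; let intermediate := st.2.1
      let advanced := st.2.2.1; let master := st.2.2.2
      let rank := PySem.Dict.getD (PySem.Dict.mk p.2) "rank" 0
      if rank ≤ intermediate_threshold then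
        (beginners.insert p.1 p.2, intermediate, advanced, master)
      else if rank ≤ advanced_threshold then
        (beginners, intermediate.insert p.1 p.2, advanced, master)
      else if rank ≤ master_threshold then
        (beginners, intermediate, advanced.insert p.1 p.2, master)
      else
        (beginners, intermediate, advanced, master.insert p.1 p.2))
    (PySem.Dict.empty, PySem.Dict.empty, PySem.Dict.empty, PySem.Dict.empty)
  (r.1.items, r.2.1.items, r.2.2.1.items, r.2.2.2.items)

-- ===== PORT B =====
-- one dict comprehension '{u: d for u, d in items if cond(d)}'
def pvComprehension (items : List (String × List (String × Int))) (cond : Int → Bool) : List (String × List (String × Int)) :=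
  (items.foldl (fun d p =>
      if cond (PySem.Dict.getD (PySem.Dict.mk p.2) "rank" 0) then d.insert p.1 p.2 else d)
    PySem.Dict.empty).items

def split_unique_players_alt (unique_players : List (String × List (String × Int))) : (List (String × List (String × Int))) × (List (String × List (String × Int))) × (List (String × List (String × Int))) × (List (String × List (String × Int))) :=
  let items := unique_players
  let beginners := pvComprehension items (fun r => r ≤ intermediate_threshold)
  let intermediate := pvComprehension items (fun r => intermediate_threshold < r && r ≤ advanced_threshold)
  let advanced := pvComprehension items (fun r => advanced_threshold < r && r ≤ master_threshold)
  let master := pvComprehension items (fun r => master_threshold < r)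
  (beginners, intermediate, advanced, master)

-- ===== PRECONDITION & SPEC =====
-- Pre_ excludes exactly the inputs where some player's data lacks the key 'rank',
-- on which the Python A raises KeyError.
def Pre_split_unique_players (unique_players : List (String × List (String × Int))) : Prop :=
  ∀ p ∈ unique_players, "rank" ∈ p.2.map (·.1)
instance (unique_players : List (String × List (String × Int))) : Decidable (Pre_split_unique_players unique_players) := by unfold Pre_split_unique_players; infer_instance

def pvWitness_split_unique_players : (List (String × List (String × Int))) :=
  [("alice", [("rank", 5)]), ("bob", [("rank", 21)]), ("eve", [("rank", 30)])]

def Spec_split_unique_players (unique_players : List (String × List (String × Int))) (out : (List (String × List (String × Int))) × (List (String × List (String × Int))) × (List (String × List (String × Int))) × (List (String × List (String × Int)))) : Prop := out = split_unique_players_alt unique_players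
instance (unique_players : List (String × List (String × Int))) (out : (List (String × List (String × Int))) × (List (String × List (String × Int))) × (List (String × List (String × Int))) × (List (String × List (String × Int)))) : Decidable (Spec_split_unique_players unique_players out) := by
  unfold Spec_split_unique_players
  have h : DecidableEq (List (String × List (String × Int))) := inferInstance
  infer_instance

-- ===== CLAIM =====
def Claim_equal_split_unique_players : Prop := ∀ (unique_players : List (String × List (String × Int))), Dom_split_unique_players unique_players → Pre_split_unique_players unique_players → Spec_split_unique_players unique_players (split_unique_players unique_players)

-- ===== LEMMAS AND PROOFS =====
-- A's single fold over the 4-tuple of dicts equals the 4-tuple of B's four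
-- independent filtered-insert folds, for any starting dicts.
theorem foldA_eq_folds4 (l : List (String × List (String × Int)))
    (d1 d2 d3 d4 : PySem.Dict String (List (String × Int))) :
    l.foldl (fun st p =>
      let beginners := st.1; let intermediate := st.2.1
      let advanced := st.2.2.1; let master := st.2.2.2
      let rank := PySem.Dict.getD (PySem.Dict.mk p.2) "rank" 0
      if rank ≤ intermediate_threshold then
        (beginners.insert p.1 p.2, intermediate, advanced, master)
      else if rank ≤ advanced_threshold then
        (beginners, intermediate.insert p.1 p.2, advanced, master)
      else if rank ≤ master_threshold then
        (beginners, intermediate, advanced.insert p.1 p.2, master)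
      else
        (beginners, intermediate, advanced, master.insert p.1 p.2)) (d1, d2, d3, d4)
    = (l.foldl (fun d p => if ((fun r => r ≤ intermediate_threshold) (PySem.Dict.getD (PySem.Dict.mk p.2) "rank" 0) : Bool) then d.insert p.1 p.2 else d) d1,
       l.foldl (fun d p => if ((fun r => intermediate_threshold < r && r ≤ advanced_threshold) (PySem.Dict.getD (PySem.Dict.mk p.2) "rank" 0) : Bool) then d.insert p.1 p.2 else d) d2,
       l.foldl (fun d p => if ((fun r => advanced_threshold < r && r ≤ master_threshold) (PySem.Dict.getD (PySem.Dict.mk p.2) "rank" 0) : Bool) then d.insert p.1 p.2 else d) d3,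
       l.foldl (fun d p => if ((fun r => master_threshold < r) (PySem.Dict.getD (PySem.Dict.mk p.2) "rank" 0) : Bool) then d.insert p.1 p.2 else d) d4) := by
  induction l generalizing d1 d2 d3 d4 with
  | nil => rfl
  | cons p l ih =>
    simp only [List.foldl_cons]
    split_ifs <;> (try rw [ih]) <;>
      (exfalso;
       simp only [intermediate_threshold, advanced_threshold, master_threshold,
         Bool.and_eq_true, decide_eq_true_eq] at *;
       omega)

theorem split_eq_alt (unique_players : List (String × List (String × Int))) :
    split_unique_players unique_players = split_unique_players_alt unique_players := by
  unfold split_unique_players split_unique_players_alt pvComprehension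
  rw [foldA_eq_folds4]

-- ===== VERDICT =====
theorem split_unique_players_spec : Claim_equal_split_unique_players := by
  intro up _ _
  unfold Spec_split_unique_players
  exact split_eq_alt up
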